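-- pv_equiv track=rewrite | github.com/robotkid828/PythOS | pythos/main.py | is_valid_hex
-- ===== SOURCE A (Python) =====
-- def is_valid_hex(hex):
--   #hex must follow official format, all characters uppercase and big endian. 11 is valid (17 in decimal), 0BA765BF is valid (195519935 in decimal), 0ba765bf is not valid (lowercase), FB567AB0 is technically valid but incorrect (big endian is used, not little endian)
--   if not isinstance(hex, str):
--     return False
--
--   hex_characters = ["0", "1", "2", "3", "4", "5", "6", "7", "8", "9", "A", "B", "C", "D", "E", "F"]
--   for hex_character in hex:
--     if not hex_character in hex_characters:
--       return False
--   return True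
-- ===== SOURCE B (Python) =====
-- import re
--
-- _HEX_RE = re.compile(r'[0-9A-F]*\Z')
--
-- def is_valid_hex(hex):
--     if not isinstance(hex, str):
--         return False
--     return _HEX_RE.match(hex) is not None
-- ===== Notes on version B (the rewrite author's own statement) =====
-- stated objective: idiomatic
-- what changed: Replaced the explicit per-character loop with membership tests against a 16-element list by a single precompiled regex full-match of the character class [0-9A-F]* over the whole string.
import Mathlib
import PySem

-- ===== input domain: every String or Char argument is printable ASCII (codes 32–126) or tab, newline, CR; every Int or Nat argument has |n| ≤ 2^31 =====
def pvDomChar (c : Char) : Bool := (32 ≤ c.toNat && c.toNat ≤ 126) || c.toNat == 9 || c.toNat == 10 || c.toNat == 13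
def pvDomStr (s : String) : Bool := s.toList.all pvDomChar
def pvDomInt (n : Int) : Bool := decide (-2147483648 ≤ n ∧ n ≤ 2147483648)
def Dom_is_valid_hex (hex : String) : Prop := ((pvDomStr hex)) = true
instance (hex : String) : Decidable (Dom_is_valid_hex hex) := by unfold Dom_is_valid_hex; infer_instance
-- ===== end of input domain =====

-- B replaces A's per-character loop over a 16-element membership list by a single
-- regex full-match of the class [0-9A-F]*; equivalence of return values is proved below.

-- ===== PORT A =====
-- A's loop with early `return False`: structural recursion over the characters,
-- testing membership in the literal list of the 16 uppercase hex characters.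
def is_valid_hex_loop : List Char → Bool
  | [] => true
  | c :: rest =>
      if ¬ (c ∈ ['0','1','2','3','4','5','6','7','8','9','A','B','C','D','E','F']) then
        false
      else
        is_valid_hex_loop rest

def is_valid_hex (hex : String) : Bool := is_valid_hex_loop hex.toList

-- ===== PORT B =====
-- The regex character class [0-9A-F]: two code-point ranges.
def hexClass (c : Char) : Bool := ('0' ≤ c && c ≤ '9') || ('A' ≤ c && c ≤ 'F')

-- `re.fullmatch('[0-9A-F]*', s)` succeeds iff every character is in the class.
def is_valid_hex_alt (hex : String) : Bool := hex.toList.all hexClass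

-- ===== PRECONDITION & SPEC =====
def Spec_is_valid_hex (hex : String) (out : Bool) : Prop := out = is_valid_hex_alt hex
instance (hex : String) (out : Bool) : Decidable (Spec_is_valid_hex hex out) := by unfold Spec_is_valid_hex; infer_instance

-- ===== CLAIM (what is proved, stated in full; the proofs are below) =====
def Claim_equal_is_valid_hex : Prop := ∀ (hex : String), Dom_is_valid_hex hex → Spec_is_valid_hex hex (is_valid_hex hex)

-- ===== LEMMAS AND PROOFS =====
theorem hexClass_eq_mem (c : Char) :
    (c ∈ ['0','1','2','3','4','5','6','7','8','9','A','B','C','D','E','F']) ↔ hexClass c = true := by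
  simp only [hexClass, List.mem_cons, List.not_mem_nil, or_false,
    Bool.or_eq_true, Bool.and_eq_true, decide_eq_true_eq]
  constructor
  · rintro (h | h | h | h | h | h | h | h | h | h | h | h | h | h | h | h) <;>
      subst h <;> first | exact Or.inl ⟨by decide, by decide⟩ | exact Or.inr ⟨by decide, by decide⟩
  · have hc : c = Char.ofNat c.toNat := (Char.ofNat_toNat c).symm
    rintro (⟨h1, h2⟩ | ⟨h1, h2⟩)
    · have b1 : 48 ≤ c.toNat := h1
      have b2 : c.toNat ≤ 57 := h2
      interval_cases h : c.toNat <;> rw [hc] <;> decide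
    · have b1 : 65 ≤ c.toNat := h1
      have b2 : c.toNat ≤ 70 := h2
      interval_cases h : c.toNat <;> rw [hc] <;> decide

theorem loop_eq_all (l : List Char) : is_valid_hex_loop l = l.all hexClass := by
  induction l with
  | nil => rfl
  | cons c rest ih =>
      simp only [is_valid_hex_loop, List.all_cons]
      by_cases h : hexClass c = true
      · rw [if_neg (not_not_intro ((hexClass_eq_mem c).mpr h)), ih, h, Bool.true_and]
      · rw [if_pos (fun hm => h ((hexClass_eq_mem c).mp hm)),
          eq_false_of_ne_true h, Bool.false_and]

-- ===== VERDICT (by name: the statement is the Claim_ definition above) =====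
theorem is_valid_hex_spec : Claim_equal_is_valid_hex := by
  intro hex _
  unfold Spec_is_valid_hex is_valid_hex is_valid_hex_alt
  exact loop_eq_all hex.toList
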